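-- pv_equiv track=rewrite | github.com/tassavarat/algorithm-practice | hash_tables/possible_sums.py | possible_sums
-- ===== SOURCE A (Python) =====
-- def possible_sums(coins, quantity):
--     """Finds the number of possible unique sums
--
--     Args:
--         coins: List of coin values
--         quantity: List of coin quantities
--
--     Returns:
--         Amount of unique sums
--     """
--     tmp_s = set()
--     s = set()
--
--     for i in range(len(coins)):
--         for c in range(1, quantity[i] + 1):
--             tmp_s.add(coins[i] * c)
--             for j in s:
--                 tmp_s.add(j + coins[i] * c)
--         s.update(tmp_s)
--     return len(s)
-- ===== SOURCE B (Python) =====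
-- def binary_parts(q):
--     """Greedy binary decomposition of q: parts 1,2,4,... plus remainder;
--     nonempty subset sums of the parts are exactly 1..q."""
--     parts = []
--     p = 1
--     while p <= q:
--         parts.append(p)
--         q -= p
--         p *= 2
--     if q > 0:
--         parts.append(q)
--     return parts
--
-- def possible_sums(coins, quantity):
--     """Finds the number of possible unique sums (bounded-knapsack set DP
--     with binary splitting of each quantity)."""
--     s = set()
--     for v, q in zip(coins, quantity):
--         for part in binary_parts(q):
--             w = v * part
--             s = s | {w} | {x + w for x in s}
--     return len(s)
-- ===== Notes on version B (the rewrite author's own statement) =====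
-- stated objective: faster
-- what changed: Replaces A's per-unit triple loop (for every coin, every count c up to quantity[i], add c copies against every sum seen so far) by a bounded-knapsack set DP with binary splitting of each quantity, so each coin contributes only O(log q) set-doubling rounds instead of q rounds.
import Mathlib
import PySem

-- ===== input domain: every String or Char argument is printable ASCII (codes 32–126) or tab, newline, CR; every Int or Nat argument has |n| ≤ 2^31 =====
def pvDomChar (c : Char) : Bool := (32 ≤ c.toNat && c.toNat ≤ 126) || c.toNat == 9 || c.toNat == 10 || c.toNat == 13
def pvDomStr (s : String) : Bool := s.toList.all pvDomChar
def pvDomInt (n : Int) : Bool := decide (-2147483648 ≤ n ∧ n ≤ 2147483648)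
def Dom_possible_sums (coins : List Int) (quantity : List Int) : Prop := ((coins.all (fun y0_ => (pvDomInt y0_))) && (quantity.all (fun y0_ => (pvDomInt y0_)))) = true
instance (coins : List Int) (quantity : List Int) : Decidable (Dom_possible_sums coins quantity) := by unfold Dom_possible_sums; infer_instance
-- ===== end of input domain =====

-- B replaces A's per-unit triple loop by a bounded-knapsack set DP with binary
-- splitting of each quantity (O(log q) set-combining rounds per coin instead of q).

-- ===== PORT A =====
-- literal port of Source A: for i in range(len(coins)): for c in range(1, quantity[i]+1):
--   tmp_s.add(coins[i]*c); for j in s: tmp_s.add(j + coins[i]*c);  then s.update(tmp_s);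
-- finally len(s).  (tmp_s persists across outer iterations, exactly as in the Python;
-- the iteration 'for j in s' only feeds set inserts, so its order cannot affect len(s).)
def possible_sums (coins : List Int) (quantity : List Int) : Int :=
  let st := (PySem.List.pyRange 0 (coins.length : Int) 1).foldl
    (fun (st : PySem.Set Int × PySem.Set Int) i =>
      let tmp := (PySem.List.pyRange 1 ((PySem.List.pyGetD quantity i 0) + 1) 1).foldl
        (fun tmp c =>
          let tmp := PySem.Set.add tmp ((PySem.List.pyGetD coins i 0) * c)
          st.2.foldl (fun tmp j => PySem.Set.add tmp (j + (PySem.List.pyGetD coins i 0) * c)) tmp)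
        st.1
      (tmp, PySem.Set.update st.2 tmp))
    ((PySem.Set.empty, PySem.Set.empty) : PySem.Set Int × PySem.Set Int)
  PySem.Set.len st.2

-- ===== PORT B =====
-- port of Source B's binary_parts: the loop is driven by fuel q.toNat+1, a pure
-- termination bound (each pass decreases q by p ≥ 1, so the fuel never runs out
-- on the guard); the guard 'p <= q', the body and the trailing 'if q > 0' are
-- exactly Python's.
def binary_parts_go : Nat → Int → Int → List Int
  | 0, _, _ => []
  | fuel + 1, q, p =>
    if p ≤ q then p :: binary_parts_go fuel (q - p) (p * 2)
    else if 0 < q then [q] else []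

def binary_parts (q : Int) : List Int := binary_parts_go (q.toNat + 1) q 1

-- s = s | {w} | {x + w for x in s}
def pvStep01 (s : PySem.Set Int) (w : Int) : PySem.Set Int :=
  PySem.Set.union (PySem.Set.union s (PySem.Set.ofList [w]))
    (PySem.Set.ofList (s.map (fun x => x + w)))

def possible_sums_alt (coins : List Int) (quantity : List Int) : Int :=
  let s := (coins.zip quantity).foldl
    (fun (s : PySem.Set Int) vq =>
      (binary_parts vq.2).foldl (fun s part => pvStep01 s (vq.1 * part)) s)
    (PySem.Set.empty : PySem.Set Int)
  PySem.Set.len s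

-- ===== PRECONDITION & SPEC =====
-- Pre_ excludes exactly the inputs where A raises IndexError: quantity shorter than coins.
def Pre_possible_sums (coins : List Int) (quantity : List Int) : Prop :=
  coins.length ≤ quantity.length
instance (coins : List Int) (quantity : List Int) : Decidable (Pre_possible_sums coins quantity) := by unfold Pre_possible_sums; infer_instance

def pvWitness_possible_sums : List Int × List Int := ([1, 2], [1, 2])

def Spec_possible_sums (coins : List Int) (quantity : List Int) (out : Int) : Prop := out = possible_sums_alt coins quantity
instance (coins : List Int) (quantity : List Int) (out : Int) : Decidable (Spec_possible_sums coins quantity out) := by unfold Spec_possible_sums; infer_instance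

-- ===== CLAIM (what is proved, stated in full; the proofs are below) =====
def Claim_equal_possible_sums : Prop := ∀ (coins : List Int) (quantity : List Int), Dom_possible_sums coins quantity → Pre_possible_sums coins quantity → Spec_possible_sums coins quantity (possible_sums coins quantity)

-- ===== LEMMAS AND PROOFS =====

def pvSsum : List Int → Int → Prop
  | [], t => t = 0
  | w :: ws, t => pvSsum ws t ∨ pvSsum ws (t - w)
def pvSsum1 : List Int → Int → Prop
  | [], _ => False
  | w :: ws, t => pvSsum1 ws t ∨ pvSsum ws (t - w)

theorem pvSsum_nonneg (ws : List Int) (hw : ∀ w ∈ ws, 1 ≤ w) (t : Int) (h : pvSsum ws t) : 0 ≤ t := by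
  induction ws generalizing t with
  | nil => simp_all [pvSsum]
  | cons w ws ih =>
    simp only [pvSsum] at h
    rcases h with h | h
    · exact ih (fun x hx => hw x (List.mem_cons_of_mem _ hx)) t h
    · have := ih (fun x hx => hw x (List.mem_cons_of_mem _ hx)) _ h
      have := hw w (List.mem_cons_self ..)
      omega

theorem pvSsum1_pos (ws : List Int) (hw : ∀ w ∈ ws, 1 ≤ w) (t : Int) (h : pvSsum1 ws t) : 1 ≤ t := by
  induction ws generalizing t with
  | nil => simp_all [pvSsum1]
  | cons w ws ih =>
    simp only [pvSsum1] at h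
    rcases h with h | h
    · exact ih (fun x hx => hw x (List.mem_cons_of_mem _ hx)) t h
    · have := pvSsum_nonneg ws (fun x hx => hw x (List.mem_cons_of_mem _ hx)) _ h
      have := hw w (List.mem_cons_self ..)
      omega

theorem pvSsum_map_mul (v : Int) (ps : List Int) (t : Int) :
    pvSsum (ps.map (fun p => v * p)) t ↔ ∃ c, pvSsum ps c ∧ t = v * c := by
  induction ps generalizing t with
  | nil =>
    simp only [List.map_nil, pvSsum]
    constructor
    · rintro rfl; exact ⟨0, rfl, by ring⟩
    · rintro ⟨c, rfl, rfl⟩; ring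
  | cons p ps ih =>
    simp only [List.map_cons, pvSsum, ih]
    constructor
    · rintro (⟨c, hc, rfl⟩ | ⟨c, hc, hct⟩)
      · exact ⟨c, Or.inl hc, rfl⟩
      · exact ⟨c + p, Or.inr (by simpa using hc), by linarith [hct]⟩
    · rintro ⟨c, hc | hc, rfl⟩
      · exact Or.inl ⟨c, hc, rfl⟩
      · exact Or.inr ⟨c - p, hc, by ring⟩

theorem pvSsum1_map_mul (v : Int) (ps : List Int) (t : Int) :
    pvSsum1 (ps.map (fun p => v * p)) t ↔ ∃ c, pvSsum1 ps c ∧ t = v * c := by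
  induction ps generalizing t with
  | nil => simp [pvSsum1]
  | cons p ps ih =>
    simp only [List.map_cons, pvSsum1, ih, pvSsum_map_mul]
    constructor
    · rintro (⟨c, hc, rfl⟩ | ⟨c, hc, hct⟩)
      · exact ⟨c, Or.inl hc, rfl⟩
      · exact ⟨c + p, Or.inr (by simpa using hc), by linarith [hct]⟩
    · rintro ⟨c, hc | hc, rfl⟩
      · exact Or.inl ⟨c, hc, rfl⟩
      · exact Or.inr ⟨c - p, hc, by ring⟩
theorem pvSsum_iff (ws : List Int) (t : Int) : pvSsum ws t ↔ t = 0 ∨ pvSsum1 ws t := by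
  induction ws generalizing t with
  | nil => simp [pvSsum, pvSsum1]
  | cons w ws ih => simp only [pvSsum, pvSsum1, ih]; tauto

theorem binary_parts_go_pos (fuel : Nat) (q p : Int) (hp : 1 ≤ p) :
    ∀ w ∈ binary_parts_go fuel q p, 1 ≤ w := by
  induction fuel generalizing q p with
  | zero => simp [binary_parts_go]
  | succ fuel ih =>
    intro w hw
    simp only [binary_parts_go] at hw
    split_ifs at hw with h1 h2
    · rcases List.mem_cons.mp hw with rfl | hw
      · exact hp
      · exact ih (q - p) (p * 2) (by omega) w hw
    · simp only [List.mem_singleton] at hw; omega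
    · simp at hw

theorem binary_parts_go_complete (fuel : Nat) (q p : Int) (hp : 1 ≤ p)
    (hf : q.toNat ≤ fuel) (t : Int) :
    (∃ a, 0 ≤ a ∧ a ≤ p - 1 ∧ pvSsum (binary_parts_go fuel q p) (t - a)) ↔
      (0 ≤ t ∧ t ≤ max q 0 + (p - 1)) := by
  induction fuel generalizing q p t with
  | zero =>
    have hq : q ≤ 0 := by omega
    simp only [binary_parts_go, pvSsum]
    constructor
    · rintro ⟨a, h1, h2, h3⟩; omega
    · rintro ⟨h1, h2⟩; exact ⟨t, by omega, by omega, by omega⟩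
  | succ fuel ih =>
    simp only [binary_parts_go]
    split_ifs with h1 h2
    · -- p ≤ q : part p taken, recurse
      have hrec := fun t => ih (q - p) (p * 2) (by omega) (by omega) t
      simp only [pvSsum]
      constructor
      · rintro ⟨a, ha0, ha1, h | h⟩
        · have := (hrec t).mp ⟨a, ha0, by omega, h⟩; omega
        · have : t - a - p = (t - (a + p)) := by ring
          rw [this] at h
          have := (hrec t).mp ⟨a + p, by omega, by omega, h⟩; omega
      · rintro ⟨h0, hq⟩
        have := (hrec t).mpr ⟨h0, by omega⟩
        rcases this with ⟨a, ha0, ha1, h⟩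
        by_cases hap : a ≤ p - 1
        · exact ⟨a, ha0, hap, Or.inl h⟩
        · refine ⟨a - p, by omega, by omega, Or.inr ?_⟩
          have : t - (a - p) - p = t - a := by ring
          rw [this]; exact h
    · -- 0 < q < p : single part q
      simp only [pvSsum]
      constructor
      · rintro ⟨a, ha0, ha1, h | h⟩ <;> omega
      · rintro ⟨h0, hq⟩
        by_cases ht : t ≤ p - 1
        · exact ⟨t, by omega, by omega, Or.inl (by omega)⟩
        · exact ⟨t - q, by omega, by omega, Or.inr (by omega)⟩
    · -- q ≤ 0
      simp only [pvSsum]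
      constructor
      · rintro ⟨a, ha0, ha1, h⟩; omega
      · rintro ⟨h0, hq⟩; exact ⟨t, by omega, by omega, by omega⟩

theorem pvSsum_binary_parts (q t : Int) :
    pvSsum (binary_parts q) t ↔ 0 ≤ t ∧ t ≤ max q 0 := by
  have h := binary_parts_go_complete (q.toNat + 1) q 1 (by omega) (by omega) t
  unfold binary_parts
  constructor
  · intro hs
    have := h.mp ⟨0, by omega, by omega, by simpa using hs⟩
    omega
  · intro hs
    rcases h.mpr ⟨hs.1, by omega⟩ with ⟨a, ha0, ha1, hss⟩
    have : a = 0 := by omega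
    subst this
    simpa using hss

theorem pvSsum1_binary_parts (q c : Int) :
    pvSsum1 (binary_parts q) c ↔ 1 ≤ c ∧ c ≤ q := by
  have hpos := binary_parts_go_pos (q.toNat + 1) q 1 (by omega)
  constructor
  · intro h
    have h1 : 1 ≤ c := pvSsum1_pos _ hpos c h
    have h2 : pvSsum (binary_parts q) c := (pvSsum_iff _ _).mpr (Or.inr h)
    have := (pvSsum_binary_parts q c).mp h2
    omega
  · rintro ⟨h1, h2⟩
    have : pvSsum (binary_parts q) c := (pvSsum_binary_parts q c).mpr ⟨by omega, by omega⟩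
    rcases (pvSsum_iff _ _).mp this with rfl | h
    · omega
    · exact h

theorem mem_pvStep01 (s : PySem.Set Int) (w x : Int) :
    x ∈ pvStep01 s w ↔ x ∈ s ∨ x = w ∨ ∃ j ∈ s, x = j + w := by
  simp only [pvStep01, PySem.Set.mem_union, PySem.Set.mem_ofList, List.mem_map,
    List.mem_singleton]
  constructor
  · rintro ((h | h) | ⟨j, hj, rfl⟩)
    · exact Or.inl h
    · exact Or.inr (Or.inl h)
    · exact Or.inr (Or.inr ⟨j, hj, rfl⟩)
  · rintro (h | h | ⟨j, hj, rfl⟩)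
    · exact Or.inl (Or.inl h)
    · exact Or.inl (Or.inr h)
    · exact Or.inr ⟨j, hj, rfl⟩

theorem nodup_pvStep01 (s : PySem.Set Int) (w : Int) (hs : s.Nodup) :
    (pvStep01 s w).Nodup :=
  PySem.Set.nodup_union _ _ (PySem.Set.nodup_union _ _ hs)

theorem nodup_foldl_pvStep01 (ws : List Int) :
    ∀ (s : PySem.Set Int), s.Nodup → (ws.foldl pvStep01 s).Nodup := by
  induction ws with
  | nil => intro s hs; simpa using hs
  | cons w ws ih => intro s hs; exact ih _ (nodup_pvStep01 s w hs)

theorem memB_fold (ws : List Int) :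
    ∀ (s : PySem.Set Int) (x : Int),
      x ∈ ws.foldl pvStep01 s ↔ x ∈ s ∨ pvSsum1 ws x ∨ ∃ j ∈ s, pvSsum1 ws (x - j) := by
  induction ws with
  | nil => intro s x; simp [pvSsum1]
  | cons w ws ih =>
    intro s x
    simp only [List.foldl_cons, ih, mem_pvStep01, pvSsum1]
    constructor
    · rintro ((h | rfl | ⟨j, hj, rfl⟩) | h | ⟨j, (hj | rfl | ⟨k, hk, rfl⟩), hs1⟩)
      · exact Or.inl h
      · exact Or.inr (Or.inl (Or.inr ((pvSsum_iff _ _).mpr (Or.inl (by omega)))))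
      · refine Or.inr (Or.inr ⟨j, hj, Or.inr ((pvSsum_iff _ _).mpr (Or.inl (by omega)))⟩)
      · exact Or.inr (Or.inl (Or.inl h))
      · exact Or.inr (Or.inr ⟨j, hj, Or.inl hs1⟩)
      · exact Or.inr (Or.inl (Or.inr ((pvSsum_iff _ _).mpr (Or.inr hs1))))
      · refine Or.inr (Or.inr ⟨k, hk, Or.inr ((pvSsum_iff _ _).mpr (Or.inr ?_))⟩)
        rw [sub_sub]
        exact hs1
    · rintro (h | (h | h) | ⟨j, hj, (h | h)⟩)
      · exact Or.inl (Or.inl h)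
      · exact Or.inr (Or.inl h)
      · rcases (pvSsum_iff _ _).mp h with h0 | h1
        · exact Or.inl (Or.inr (Or.inl (by omega)))
        · exact Or.inr (Or.inr ⟨w, Or.inr (Or.inl rfl), h1⟩)
      · exact Or.inr (Or.inr ⟨j, Or.inl hj, h⟩)
      · rcases (pvSsum_iff _ _).mp h with h0 | h1
        · exact Or.inl (Or.inr (Or.inr ⟨j, hj, by omega⟩))
        · refine Or.inr (Or.inr ⟨j + w, Or.inr (Or.inr ⟨j, hj, rfl⟩), ?_⟩)
          rw [← sub_sub]
          exact h1

def pvAstep (st : PySem.Set Int × PySem.Set Int) (vq : Int × Int) :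
    PySem.Set Int × PySem.Set Int :=
  let tmp := (PySem.List.pyRange 1 (vq.2 + 1) 1).foldl
    (fun tmp c =>
      let tmp := PySem.Set.add tmp (vq.1 * c)
      st.2.foldl (fun tmp j => PySem.Set.add tmp (j + vq.1 * c)) tmp)
    st.1
  (tmp, PySem.Set.update st.2 tmp)

def pvBstep (s : PySem.Set Int) (vq : Int × Int) : PySem.Set Int :=
  (binary_parts vq.2).foldl (fun s part => pvStep01 s (vq.1 * part)) s

theorem memA_inner (v : Int) (s : PySem.Set Int) (cs : List Int) :
    ∀ (tmp : PySem.Set Int) (x : Int),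
      x ∈ cs.foldl
          (fun tmp c =>
            let tmp := PySem.Set.add tmp (v * c)
            s.foldl (fun tmp j => PySem.Set.add tmp (j + v * c)) tmp) tmp
        ↔ x ∈ tmp ∨ ∃ c ∈ cs, x = v * c ∨ ∃ j ∈ s, x = j + v * c := by
  induction cs with
  | nil => intro tmp x; simp
  | cons c cs ih =>
    intro tmp x
    simp only [List.foldl_cons, ih]
    rw [PySem.Set.mem_foldl_add s (fun j => j + v * c)]
    simp only [PySem.Set.mem_add, List.mem_cons]
    constructor
    · rintro (((h | rfl) | ⟨j, hj, rfl⟩) | ⟨c', hc', h⟩)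
      · exact Or.inl h
      · exact Or.inr ⟨c, Or.inl rfl, Or.inl rfl⟩
      · exact Or.inr ⟨c, Or.inl rfl, Or.inr ⟨j, hj, rfl⟩⟩
      · exact Or.inr ⟨c', Or.inr hc', h⟩
    · rintro (h | ⟨c', (rfl | hc'), h⟩)
      · exact Or.inl (Or.inl (Or.inl h))
      · rcases h with rfl | ⟨j, hj, rfl⟩
        · exact Or.inl (Or.inl (Or.inr rfl))
        · exact Or.inl (Or.inr ⟨j, hj, rfl⟩)
      · exact Or.inr ⟨c', hc', h⟩

theorem memA_coin (v q : Int) (tmp s : PySem.Set Int) (hts : ∀ y ∈ tmp, y ∈ s) (x : Int) :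
    x ∈ (pvAstep (tmp, s) (v, q)).2 ↔
      x ∈ s ∨ ∃ c, (1 ≤ c ∧ c ≤ q) ∧ (x = v * c ∨ ∃ j ∈ s, x = j + v * c) := by
  simp only [pvAstep, PySem.Set.mem_update, memA_inner, PySem.List.mem_pyRange_one]
  constructor
  · rintro (h | h | ⟨c, hc, h⟩)
    · exact Or.inl h
    · exact Or.inl (hts x h)
    · exact Or.inr ⟨c, ⟨hc.1, by omega⟩, h⟩
  · rintro (h | ⟨c, hc, h⟩)
    · exact Or.inl h
    · exact Or.inr (Or.inr ⟨c, ⟨hc.1, by omega⟩, h⟩)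

theorem tmp_sub_A (v q : Int) (tmp s : PySem.Set Int) :
    ∀ y ∈ (pvAstep (tmp, s) (v, q)).1, y ∈ (pvAstep (tmp, s) (v, q)).2 := by
  intro y hy
  exact (PySem.Set.mem_update _ _ _).mpr (Or.inr hy)

theorem nodup_A_coin (v q : Int) (tmp s : PySem.Set Int) (hs : s.Nodup) :
    (pvAstep (tmp, s) (v, q)).2.Nodup :=
  PySem.Set.nodup_update _ _ hs

theorem memB_coin (v q : Int) (s : PySem.Set Int) (x : Int) :
    x ∈ pvBstep s (v, q) ↔
      x ∈ s ∨ ∃ c, (1 ≤ c ∧ c ≤ q) ∧ (x = v * c ∨ ∃ j ∈ s, x = j + v * c) := by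
  unfold pvBstep
  rw [show ((binary_parts q).foldl (fun s part => pvStep01 s (v * part)) s)
        = (((binary_parts q).map (fun p => v * p)).foldl pvStep01 s) by rw [List.foldl_map]]
  rw [memB_fold]
  simp only [pvSsum1_map_mul, pvSsum1_binary_parts]
  constructor
  · rintro (h | ⟨c, hc, rfl⟩ | ⟨j, hj, c, hc, hcx⟩)
    · exact Or.inl h
    · exact Or.inr ⟨c, hc, Or.inl rfl⟩
    · exact Or.inr ⟨c, hc, Or.inr ⟨j, hj, by omega⟩⟩
  · rintro (h | ⟨c, hc, rfl | ⟨j, hj, rfl⟩⟩)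
    · exact Or.inl h
    · exact Or.inr (Or.inl ⟨c, hc, rfl⟩)
    · exact Or.inr (Or.inr ⟨j, hj, c, hc, by omega⟩)

theorem nodup_B_coin (v q : Int) (s : PySem.Set Int) (hs : s.Nodup) :
    (pvBstep s (v, q)).Nodup := by
  have h2 := nodup_foldl_pvStep01 ((binary_parts q).map (fun p => v * p)) s hs
  rwa [List.foldl_map] at h2

theorem pv_main_fold (l : List (Int × Int)) :
    ∀ (tmp s sB : PySem.Set Int), s.Nodup → sB.Nodup →
      (∀ y ∈ tmp, y ∈ s) → (∀ x, x ∈ s ↔ x ∈ sB) →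
      ((l.foldl pvAstep (tmp, s)).2.Nodup ∧ (l.foldl pvBstep sB).Nodup ∧
        ∀ x, x ∈ (l.foldl pvAstep (tmp, s)).2 ↔ x ∈ l.foldl pvBstep sB) := by
  induction l with
  | nil => intro tmp s sB hs hsB hts h; exact ⟨hs, hsB, h⟩
  | cons vq l ih =>
    intro tmp s sB hs hsB hts h
    obtain ⟨v, q⟩ := vq
    simp only [List.foldl_cons]
    have hA : pvAstep (tmp, s) (v, q) =
        ((pvAstep (tmp, s) (v, q)).1, (pvAstep (tmp, s) (v, q)).2) := rfl
    rw [hA]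
    refine ih _ _ _ (nodup_A_coin v q tmp s hs) (nodup_B_coin v q sB hsB)
      (tmp_sub_A v q tmp s) ?_
    intro x
    rw [memA_coin v q tmp s hts x, memB_coin v q sB x]
    simp only [h]

theorem pv_len_eq (s t : List Int) (hs : s.Nodup) (ht : t.Nodup) (h : ∀ x, x ∈ s ↔ x ∈ t) :
    PySem.Set.len s = PySem.Set.len t := by
  have : s.length = t.length := ((List.perm_ext_iff_of_nodup hs ht).mpr h).length_eq
  simp [PySem.Set.len, this]

theorem pv_foldl_range_zip {σ : Type} (f : σ → Int × Int → σ) :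
    ∀ (xs ys : List Int), xs.length ≤ ys.length → ∀ (st : σ),
      (List.range xs.length).foldl (fun st k => f st (xs.getD k 0, ys.getD k 0)) st
        = (xs.zip ys).foldl f st := by
  intro xs
  induction xs with
  | nil => intro ys h st; simp
  | cons x xs ih =>
    intro ys h st
    cases ys with
    | nil => simp at h
    | cons y ys =>
      rw [List.length_cons, List.range_succ_eq_map, List.foldl_cons, List.foldl_map]
      simp only [List.getD_cons_zero, List.getD_cons_succ, List.zip_cons_cons, List.foldl_cons]
      exact ih ys (by simpa using h) (f st (x, y))

theorem pv_foldl_pyRange_zip {σ : Type} (f : σ → Int × Int → σ)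
    (xs ys : List Int) (h : xs.length ≤ ys.length) (st : σ) :
    (PySem.List.pyRange 0 (xs.length : Int) 1).foldl
        (fun st i => f st (PySem.List.pyGetD xs i 0, PySem.List.pyGetD ys i 0)) st
      = (xs.zip ys).foldl f st := by
  rw [PySem.List.pyRange_zero_nat, List.foldl_map]
  simp only [PySem.List.pyGetD_natCast]
  exact pv_foldl_range_zip f xs ys h st

theorem pv_final (coins quantity : List Int) (h : coins.length ≤ quantity.length) :
    possible_sums coins quantity = possible_sums_alt coins quantity := by
  have hzipA : possible_sums coins quantity
      = PySem.Set.len ((coins.zip quantity).foldl pvAstep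
          ((PySem.Set.empty, PySem.Set.empty) : PySem.Set Int × PySem.Set Int)).2 := by
    rw [← pv_foldl_pyRange_zip pvAstep coins quantity h]
    rfl
  have hzipB : possible_sums_alt coins quantity
      = PySem.Set.len ((coins.zip quantity).foldl pvBstep (PySem.Set.empty : PySem.Set Int)) := rfl
  rw [hzipA, hzipB]
  obtain ⟨h1, h2, h3⟩ := pv_main_fold (coins.zip quantity)
    PySem.Set.empty PySem.Set.empty PySem.Set.empty
    List.nodup_nil List.nodup_nil (by simp [PySem.Set.empty]) (fun x => Iff.rfl)
  exact pv_len_eq _ _ h1 h2 h3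

-- ===== VERDICT (by name: the statement is the Claim_ definition above) =====
theorem possible_sums_spec : Claim_equal_possible_sums := by
  intro coins quantity _ hpre
  unfold Spec_possible_sums
  exact pv_final coins quantity hpre
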